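-- pv_equiv track=rewrite | github.com/philipp-mohr/pyopencl-extension | pyopencl_extension/framework.py | command_compute_address
-- ===== SOURCE A (Python) =====
-- def command_compute_address(n_dim: int) -> str:
--     command = '0'
--     for i in range(n_dim):
--         offset = '1'
--         for j in range(i + 1, n_dim):
--             offset += '*get_global_size({})'.format(j)
--         command += '+get_global_id({})*{}'.format(i, offset)
--     return command
-- ===== SOURCE B (Python) =====
-- def command_compute_address(n_dim: int) -> str:
--     factors = ''
--     terms = []
--     for i in range(n_dim - 1, -1, -1):
--         terms.append('get_global_id({})*1{}'.format(i, factors))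
--         factors = '*get_global_size({})'.format(i) + factors
--     terms.reverse()
--     command = '0'
--     for t in terms:
--         command += '+' + t
--     return command
-- ===== Notes on version B (the rewrite author's own statement) =====
-- stated objective: faster
-- what changed: Replaces the nested inner loop recomputing the size-factor suffix for each i by a single reverse pass that maintains the suffix as a running accumulator prepended to at each step, then reverses the collected terms and joins them.
import Mathlib
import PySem

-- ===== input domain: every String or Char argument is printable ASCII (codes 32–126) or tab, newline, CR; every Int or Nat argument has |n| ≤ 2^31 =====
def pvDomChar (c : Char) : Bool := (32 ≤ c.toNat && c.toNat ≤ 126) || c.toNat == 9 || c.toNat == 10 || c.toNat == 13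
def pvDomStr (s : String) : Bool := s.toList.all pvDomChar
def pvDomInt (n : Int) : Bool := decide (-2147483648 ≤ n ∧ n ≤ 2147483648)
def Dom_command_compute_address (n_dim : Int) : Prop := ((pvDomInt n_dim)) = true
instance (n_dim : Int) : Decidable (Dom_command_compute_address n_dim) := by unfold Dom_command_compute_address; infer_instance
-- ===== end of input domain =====

-- B replaces A's nested inner loop (which rebuilds the size-factor suffix for every i)
-- by one reverse pass maintaining that suffix as a running accumulator: objective = faster.

-- ===== PORT A =====
def command_compute_address (n_dim : Int) : String :=
  (PySem.List.pyRange 0 n_dim 1).foldl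
    (fun command i =>
      let offset := (PySem.List.pyRange (i + 1) n_dim 1).foldl
        (fun offset j => offset ++ "*get_global_size(" ++ PySem.Int.toStr j ++ ")") "1"
      command ++ "+get_global_id(" ++ PySem.Int.toStr i ++ ")*" ++ offset)
    "0"

-- ===== PORT B =====
def command_compute_address_alt (n_dim : Int) : String :=
  let st := (PySem.List.pyRange (n_dim - 1) (-1) (-1)).foldl
    (fun (st : String × List String) i =>
      ("*get_global_size(" ++ PySem.Int.toStr i ++ ")" ++ st.1,
       st.2 ++ ["get_global_id(" ++ PySem.Int.toStr i ++ ")*1" ++ st.1]))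
    ("", [])
  st.2.reverse.foldl (fun command t => command ++ "+" ++ t) "0"

-- ===== PRECONDITION & SPEC =====
def Spec_command_compute_address (n_dim : Int) (out : String) : Prop := out = command_compute_address_alt n_dim
instance (n_dim : Int) (out : String) : Decidable (Spec_command_compute_address n_dim out) := by unfold Spec_command_compute_address; infer_instance

-- ===== CLAIM (what is proved, stated in full; the proofs are below) =====
def Claim_equal_command_compute_address : Prop := ∀ (n_dim : Int), Dom_command_compute_address n_dim → Spec_command_compute_address n_dim (command_compute_address n_dim)

-- ===== LEMMAS AND PROOFS =====

/-- the suffix of size factors for indices in [i, n) -/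
def pvFac (i n : Int) : String :=
  (PySem.List.pyRange i n 1).foldl
    (fun s j => s ++ "*get_global_size(" ++ PySem.Int.toStr j ++ ")") ""

/-- the term contributed by dimension i -/
def pvTerm (i n : Int) : String :=
  "get_global_id(" ++ PySem.Int.toStr i ++ ")*1" ++ pvFac (i + 1) n

theorem pv_foldl_pull (l : List Int) (init : String) :
    l.foldl (fun s j => s ++ "*get_global_size(" ++ PySem.Int.toStr j ++ ")") init
      = init ++ l.foldl (fun s j => s ++ "*get_global_size(" ++ PySem.Int.toStr j ++ ")") "" := by
  induction l generalizing init with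
  | nil => simp
  | cons a t ih =>
    simp only [List.foldl_cons]
    rw [ih (init ++ "*get_global_size(" ++ PySem.Int.toStr a ++ ")"),
        ih ("" ++ "*get_global_size(" ++ PySem.Int.toStr a ++ ")")]
    apply String.ext
    simp [List.append_assoc]

theorem pvFac_cons {i n : Int} (h : i < n) :
    pvFac i n = "*get_global_size(" ++ PySem.Int.toStr i ++ ")" ++ pvFac (i + 1) n := by
  unfold pvFac
  rw [PySem.List.pyRange_one_cons h, List.foldl_cons, pv_foldl_pull]
  apply String.ext
  simp [List.append_assoc]

theorem pvA_eq (n : Int) :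
    command_compute_address n =
      (PySem.List.pyRange 0 n 1).foldl (fun c i => c ++ "+" ++ pvTerm i n) "0" := by
  unfold command_compute_address
  have hf : (fun (command : String) (i : Int) =>
      command ++ "+get_global_id(" ++ PySem.Int.toStr i ++ ")*" ++
        ((PySem.List.pyRange (i + 1) n 1).foldl
          (fun offset j => offset ++ "*get_global_size(" ++ PySem.Int.toStr j ++ ")") "1"))
      = (fun (c : String) (i : Int) => c ++ "+" ++ pvTerm i n) := by
    funext c i
    rw [pv_foldl_pull]
    unfold pvTerm pvFac
    apply String.ext
    simp [List.append_assoc]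
  simp only [hf]

/-- loop invariant for B's single descending pass -/
theorem pvB_loop (n : Int) : ∀ (k : Nat), (k : Int) ≤ n → ∀ (acc : List String),
    (PySem.List.pyRange ((k : Int) - 1) (-1) (-1)).foldl
      (fun (st : String × List String) i =>
        ("*get_global_size(" ++ PySem.Int.toStr i ++ ")" ++ st.1,
         st.2 ++ ["get_global_id(" ++ PySem.Int.toStr i ++ ")*1" ++ st.1]))
      (pvFac (k : Int) n, acc)
    = (pvFac 0 n, acc ++ ((List.range k).reverse.map (fun (i : Nat) => pvTerm (i : Int) n))) := by
  intro k
  induction k with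
  | zero =>
    intro _ acc
    rw [PySem.List.pyRange_neg_one_eq_nil (by norm_num)]
    simp
  | succ m ih =>
    intro hk acc
    have h1 : ((m : Int) + 1 - 1) = (m : Int) := by ring
    have h2 : (-1 : Int) < (m : Int) := by omega
    push_cast
    rw [h1, PySem.List.pyRange_neg_one_cons h2, List.foldl_cons]
    have hm : (m : Int) < n := by push_cast at hk; omega
    have hstep :
        ("*get_global_size(" ++ PySem.Int.toStr (m : Int) ++ ")" ++ pvFac ((m : Int) + 1) n,
         acc ++ ["get_global_id(" ++ PySem.Int.toStr (m : Int) ++ ")*1" ++ pvFac ((m : Int) + 1) n])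
        = (pvFac (m : Int) n, acc ++ [pvTerm (m : Int) n]) := by
      rw [pvFac_cons hm]
      unfold pvTerm
      constructor
    have hcast : ((m : Int) + 1) = ((m + 1 : Nat) : Int) := by push_cast; ring
    simp only [hstep]
    rw [ih (by omega) (acc ++ [pvTerm (m : Int) n])]
    simp [List.range_succ]
-- ===== VERDICT (by name: the statement is the Claim_ definition above) =====
theorem command_compute_address_spec : Claim_equal_command_compute_address := by
  intro n _
  unfold Spec_command_compute_address
  rw [pvA_eq]
  unfold command_compute_address_alt
  by_cases h : n ≤ 0
  · rw [PySem.List.pyRange_one_eq_nil h, PySem.List.pyRange_neg_one_eq_nil (by omega)]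
    simp
  · obtain ⟨m, rfl⟩ : ∃ m : Nat, n = (m : Int) :=
      ⟨n.toNat, (Int.toNat_of_nonneg (by omega)).symm⟩
    have h0 : pvFac (m : Int) (m : Int) = "" := by
      unfold pvFac; rw [PySem.List.pyRange_one_eq_nil le_rfl]; rfl
    have hloop := pvB_loop (m : Int) m le_rfl []
    rw [h0] at hloop
    rw [hloop]
    simp only [List.nil_append, List.map_reverse, List.reverse_reverse]
    rw [PySem.List.pyRange_zero_natCast, List.foldl_map, List.foldl_map]
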